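-- pv_equiv track=rewrite | github.com/andreasblomqvist/simple_simulation | backend/src/services/simulation_engine.py | _determine_level_order
-- ===== SOURCE A (Python) =====
-- from typing import Dict, List, Optional, Tuple, Any
--
-- def _determine_level_order(config_data: List[Dict]) -> List[str]:
--     """Dynamically determine the level order from configuration."""
--     levels = set()
--     for office_config in config_data:
--         for role_name, role_data in office_config.get('roles', {}).items():
--             if role_name != 'Operations':
--                 levels.update(role_data.keys())
--
--     # Use a standard, sorted progression path
--     standard_order = ['A', 'AC', 'C', 'SrC', 'AM', 'M', 'SrM', 'PiP']
--
--     # Filter and sort found levels according to the standard order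
--     sorted_levels = [level for level in standard_order if level in levels]
--
--     return sorted_levels
-- ===== SOURCE B (Python) =====
-- def _determine_level_order(config_data):
--     """Walk the fixed standard progression; keep each level that some
--     non-Operations role in some office defines. No set is built."""
--     result = []
--     for level in ['A', 'AC', 'C', 'SrC', 'AM', 'M', 'SrM', 'PiP']:
--         if any(level in role_data
--                for office_config in config_data
--                for role_name, role_data in office_config.get('roles', {}).items()
--                if role_name != 'Operations'):
--             result.append(level)
--     return result
-- ===== Notes on version B (the rewrite author's own statement) =====
-- stated objective: alternative
-- what changed: Instead of accumulating a set of all level keys and then filtering the standard order by membership, B iterates the fixed 8-element standard order directly and for each level scans the config for any non-Operations role defining it, maintaining only the output list.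
import Mathlib
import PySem

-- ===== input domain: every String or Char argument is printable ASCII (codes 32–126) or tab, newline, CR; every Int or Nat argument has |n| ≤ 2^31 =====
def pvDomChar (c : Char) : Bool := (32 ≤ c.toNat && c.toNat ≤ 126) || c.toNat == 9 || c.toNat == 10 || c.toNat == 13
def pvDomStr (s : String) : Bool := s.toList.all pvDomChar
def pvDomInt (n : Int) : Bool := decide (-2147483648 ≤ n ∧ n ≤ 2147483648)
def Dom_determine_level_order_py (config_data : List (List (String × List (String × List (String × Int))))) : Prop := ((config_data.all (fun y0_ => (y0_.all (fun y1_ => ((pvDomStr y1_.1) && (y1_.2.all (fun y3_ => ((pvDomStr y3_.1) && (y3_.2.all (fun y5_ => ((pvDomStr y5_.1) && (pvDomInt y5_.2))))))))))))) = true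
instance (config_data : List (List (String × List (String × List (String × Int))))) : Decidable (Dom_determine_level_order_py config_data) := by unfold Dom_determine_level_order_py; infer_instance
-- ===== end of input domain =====

-- B walks the fixed standard-order list and scans the config per level instead of
-- building a set of levels first and filtering; alternative decomposition, same cost class.

-- ===== PORT A =====
-- office_config.get('roles', {}) : first-match lookup with default empty dict
def pvGetRoles (office_config : List (String × List (String × List (String × Int)))) :
    List (String × List (String × Int)) :=
  (PySem.Dict.mk office_config).getD "roles" []

def determine_level_order_py (config_data : List (List (String × List (String × List (String × Int))))) : List String :=
  let levels : PySem.Set String :=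
    config_data.foldl (fun levels office_config =>
      (pvGetRoles office_config).foldl (fun levels rr =>
        if rr.1 ≠ "Operations" then PySem.Set.update levels (rr.2.map Prod.fst) else levels)
        levels)
      PySem.Set.empty
  (["A", "AC", "C", "SrC", "AM", "M", "SrM", "PiP"]).filter
    (fun level => PySem.Set.contains levels level)

-- ===== PORT B =====
def determine_level_order_py_alt (config_data : List (List (String × List (String × List (String × Int))))) : List String :=
  (["A", "AC", "C", "SrC", "AM", "M", "SrM", "PiP"]).filter
    (fun level =>
      config_data.any (fun office_config =>
        (pvGetRoles office_config).any (fun rr =>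
          rr.1 ≠ "Operations" && rr.2.any (fun p => p.1 == level))))

-- ===== PRECONDITION & SPEC =====
def Spec_determine_level_order_py (config_data : List (List (String × List (String × List (String × Int))))) (out : List String) : Prop := out = determine_level_order_py_alt config_data
instance (config_data : List (List (String × List (String × List (String × Int))))) (out : List String) : Decidable (Spec_determine_level_order_py config_data out) := by unfold Spec_determine_level_order_py; infer_instance

-- ===== CLAIM (what is proved, stated in full; the proofs are below) =====
def Claim_equal_determine_level_order_py : Prop := ∀ (config_data : List (List (String × List (String × List (String × Int))))), Dom_determine_level_order_py config_data → Spec_determine_level_order_py config_data (determine_level_order_py config_data)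

-- ===== LEMMAS AND PROOFS =====

-- membership in the inner (per-office) fold
theorem pv_mem_inner (x : String) (roles : List (String × List (String × Int)))
    (s : PySem.Set String) :
    x ∈ roles.foldl (fun levels rr =>
        if rr.1 ≠ "Operations" then PySem.Set.update levels (rr.2.map Prod.fst) else levels) s
      ↔ x ∈ s ∨ ∃ rr ∈ roles, rr.1 ≠ "Operations" ∧ x ∈ rr.2.map Prod.fst := by
  induction roles generalizing s with
  | nil => simp
  | cons r rest ih =>
    simp only [List.foldl_cons, ih]
    by_cases h : r.1 = "Operations" <;> simp [h, PySem.Set.mem_update] <;> tauto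

-- membership in the outer fold
theorem pv_mem_outer (x : String)
    (cd : List (List (String × List (String × List (String × Int)))))
    (s : PySem.Set String) :
    x ∈ cd.foldl (fun levels oc =>
        (pvGetRoles oc).foldl (fun levels rr =>
          if rr.1 ≠ "Operations" then PySem.Set.update levels (rr.2.map Prod.fst) else levels)
          levels) s
      ↔ x ∈ s ∨ ∃ oc ∈ cd, ∃ rr ∈ pvGetRoles oc, rr.1 ≠ "Operations" ∧ x ∈ rr.2.map Prod.fst := by
  induction cd generalizing s with
  | nil => simp
  | cons oc rest ih =>
    simp only [List.foldl_cons, ih, pv_mem_inner, List.mem_cons]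
    constructor
    · rintro ((h | h) | ⟨o, ho, h⟩)
      · exact Or.inl h
      · exact Or.inr ⟨oc, Or.inl rfl, h⟩
      · exact Or.inr ⟨o, Or.inr ho, h⟩
    · rintro (h | ⟨o, (rfl | ho), h⟩)
      · exact Or.inl (Or.inl h)
      · exact Or.inl (Or.inr h)
      · exact Or.inr ⟨o, ho, h⟩

-- ===== VERDICT (by name: the statement is the Claim_ definition above) =====
theorem determine_level_order_py_spec : Claim_equal_determine_level_order_py := by
  intro cd _
  unfold Spec_determine_level_order_py determine_level_order_py determine_level_order_py_alt
  apply List.filter_congr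
  intro level _
  rw [PySem.Set.contains_eq_listContains, Bool.eq_iff_iff]
  simp only [List.contains_iff_mem, pv_mem_outer, List.any_eq_true, List.mem_map,
    Bool.and_eq_true, ne_eq, decide_not, Bool.not_eq_eq_eq_not,
    Bool.not_true, beq_iff_eq, decide_eq_false_iff_not]
  constructor
  · rintro (h | ⟨oc, hoc, rr, hrr, hne, p, hp, hpe⟩)
    · simp [PySem.Set.empty] at h
    · exact ⟨oc, hoc, rr, hrr, hne, p, hp, hpe⟩
  · rintro ⟨oc, hoc, rr, hrr, hne, p, hp, hpe⟩
    exact Or.inr ⟨oc, hoc, rr, hrr, hne, p, hp, hpe⟩
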